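-- pv_equiv track=rewrite | github.com/alex-briasco-stewart/aoc_2023 | 17.py | gen_moves
-- ===== SOURCE A (Python) =====
-- def is_in_grid(i, j, grid_len, grid_zero_len):
--     return i >= 0 and i < grid_len and j >= 0 and j < grid_zero_len
--
-- def gen_moves(grid, direction, pos):
--     #returns (score_delta, pos, mvmt_delta)
--     offset = None
--     if direction == "N":
--         offset = (-1, 0)
--     elif direction == "E":
--         offset = (0, 1)
--     elif direction == "W":
--         offset = (0, -1)
--     elif direction == "S":
--         offset = (1, 0)
--     moves = []
--     running_score = 0
--     mvmt = []
--     grid_len = len(grid)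
--     grid_zero_len = len(grid[0])
--     for i in range(1, 4):
--         y = pos[0] + offset[0]*i
--         x = pos[1] + offset[1]*i
--         if is_in_grid(y, x, grid_len, grid_zero_len):
--             running_score += grid[y][x]
--             mvmt += [direction]
--     for i in range(4, 11):
--         newpos = (pos[0] + offset[0]*i, pos[1]+offset[1]*i)
--         if is_in_grid(newpos[0], newpos[1], grid_len, grid_zero_len):
--             running_score += grid[newpos[0]][newpos[1]]
--             moves.append((running_score, newpos, mvmt + [direction]))
--             mvmt += [direction]
--     return moves
-- ===== SOURCE B (Python) =====
-- def gen_moves(grid, direction, pos):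
--     # staged passes: build the filtered in-grid hit list, then emit moves by
--     # index with slice-sum prefix scores; no running accumulators
--     dy, dx = {"N": (-1, 0), "E": (0, 1), "W": (0, -1), "S": (1, 0)}[direction]
--     h, w = len(grid), len(grid[0])
--     hits = [(y, x, i)
--             for (y, x, i) in ((pos[0] + dy * i, pos[1] + dx * i, i) for i in range(1, 11))
--             if 0 <= y < h and 0 <= x < w]
--     return [(sum(grid[y][x] for (y, x, _) in hits[:k + 1]), hits[k][:2], [direction] * (k + 1))
--             for k in range(len(hits)) if hits[k][2] >= 4]
-- ===== Notes on version B (the rewrite author's own statement) =====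
-- stated objective: alternative
-- what changed: B replaces A's two running-accumulator loops (score and mvmt list threaded through steps 1-3 and 4-10) with staged declarative passes: one comprehension builds the filtered in-grid hit list, then a comprehension over its indices emits each move with a slice-sum prefix score and [direction]*(k+1); no running state at all.
import Mathlib
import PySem

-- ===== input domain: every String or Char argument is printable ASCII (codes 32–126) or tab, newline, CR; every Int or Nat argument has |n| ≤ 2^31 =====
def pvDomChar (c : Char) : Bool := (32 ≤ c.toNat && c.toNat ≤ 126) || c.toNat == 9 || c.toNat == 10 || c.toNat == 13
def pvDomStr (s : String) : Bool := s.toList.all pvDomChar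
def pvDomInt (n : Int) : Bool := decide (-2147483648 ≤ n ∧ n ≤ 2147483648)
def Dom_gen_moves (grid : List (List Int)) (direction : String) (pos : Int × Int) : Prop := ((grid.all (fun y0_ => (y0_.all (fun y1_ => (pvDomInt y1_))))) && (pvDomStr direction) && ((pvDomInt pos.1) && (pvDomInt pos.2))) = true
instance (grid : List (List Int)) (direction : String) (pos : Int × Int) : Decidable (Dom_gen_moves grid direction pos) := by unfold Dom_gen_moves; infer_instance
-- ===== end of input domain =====

-- B replaces A's two accumulator loops by staged passes (filtered hit list, then index comprehension with slice-sum prefix scores); same cost, different decomposition.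


-- ===== PORT A =====
def is_in_grid (i j grid_len grid_zero_len : Int) : Bool :=
  decide (i ≥ 0) && decide (i < grid_len) && decide (j ≥ 0) && decide (j < grid_zero_len)

-- grid[y][x]; under Pre_ every access the guards let through is in range, so the defaults are never taken
def pvCell (grid : List (List Int)) (y x : Int) : Int :=
  ((PySem.List.pyGet? ((PySem.List.pyGet? grid y).getD []) x).getD 0)

-- body of A's first loop (range(1,4)): state = (running_score, mvmt)
def pvStepA1 (grid : List (List Int)) (direction : String) (pos offset : Int × Int)
    (grid_len grid_zero_len : Int) (st : Int × List String) (i : Int) : Int × List String :=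
  let y := pos.1 + offset.1 * i
  let x := pos.2 + offset.2 * i
  if is_in_grid y x grid_len grid_zero_len then (st.1 + pvCell grid y x, st.2 ++ [direction]) else st

-- body of A's second loop (range(4,11)): state = (moves, running_score, mvmt)
def pvStepA2 (grid : List (List Int)) (direction : String) (pos offset : Int × Int)
    (grid_len grid_zero_len : Int)
    (st : List (Int × (Int × Int) × List String) × Int × List String) (i : Int) :
    List (Int × (Int × Int) × List String) × Int × List String :=
  let newpos := (pos.1 + offset.1 * i, pos.2 + offset.2 * i)
  if is_in_grid newpos.1 newpos.2 grid_len grid_zero_len then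
    (st.1 ++ [(st.2.1 + pvCell grid newpos.1 newpos.2, newpos, st.2.2 ++ [direction])],
     st.2.1 + pvCell grid newpos.1 newpos.2, st.2.2 ++ [direction])
  else st

def gen_moves (grid : List (List Int)) (direction : String) (pos : Int × Int) :
    List (Int × (Int × Int) × List String) :=
  let offset? : Option (Int × Int) :=
    if direction = "N" then some (-1, 0)
    else if direction = "E" then some (0, 1)
    else if direction = "W" then some (0, -1)
    else if direction = "S" then some (1, 0)
    else none
  -- offset = None makes Python raise TypeError at offset[0]; such directions are excluded by Pre_
  let offset := offset?.getD (0, 0)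
  let grid_len : Int := grid.length
  -- len(grid[0]) raises IndexError on []; excluded by Pre_
  let grid_zero_len : Int := ((PySem.List.pyGet? grid 0).getD []).length
  let st1 := (PySem.List.pyRange 1 4 1).foldl (pvStepA1 grid direction pos offset grid_len grid_zero_len) (0, [])
  let st2 := (PySem.List.pyRange 4 11 1).foldl (pvStepA2 grid direction pos offset grid_len grid_zero_len) ([], st1.1, st1.2)
  st2.1

-- ===== PORT B =====
-- sum(grid[y][x] for (y, x, _) in hits[:k+1])  (hits[:k+1] = take (k+1), k ≥ 0)
def pvHitCellSum (grid : List (List Int)) (hits : List (Int × Int × Int)) (k : Nat) : Int :=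
  ((hits.take (k + 1)).map (fun t => pvCell grid t.1 t.2.1)).sum

def gen_moves_alt (grid : List (List Int)) (direction : String) (pos : Int × Int) :
    List (Int × (Int × Int) × List String) :=
  -- dict lookup; a missing key raises KeyError in Python, excluded by Pre_
  let offset := ((PySem.Dict.ofList
      [("N", ((-1 : Int), (0 : Int))), ("E", ((0 : Int), (1 : Int))),
       ("W", ((0 : Int), (-1 : Int))), ("S", ((1 : Int), (0 : Int)))]).get? direction).getD (0, 0)
  let h : Int := grid.length
  let w : Int := ((PySem.List.pyGet? grid 0).getD []).length
  let hits := ((PySem.List.pyRange 1 11 1).map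
      (fun i => (pos.1 + offset.1 * i, pos.2 + offset.2 * i, i))).filter
      (fun t => decide (0 ≤ t.1) && decide (t.1 < h) && decide (0 ≤ t.2.1) && decide (t.2.1 < w))
  ((List.range hits.length).filter
      (fun k => decide ((4 : Int) ≤ (hits.getD k (0, 0, 0)).2.2))).map
    (fun k => (pvHitCellSum grid hits k,
               ((hits.getD k (0, 0, 0)).1, (hits.getD k (0, 0, 0)).2.1),
               List.replicate (k + 1) direction))

-- ===== PRECONDITION & SPEC =====
-- offset table used only to state Pre_ (which cells the loops index)
def pvOffset (direction : String) : Int × Int :=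
  if direction = "N" then (-1, 0)
  else if direction = "E" then (0, 1)
  else if direction = "W" then (0, -1)
  else if direction = "S" then (1, 0)
  else (0, 0)

-- Pre_ excludes exactly the inputs where Python A raises: an unknown direction (TypeError on offset[0]),
-- an empty grid (IndexError on grid[0]), and ragged grids where an actually-indexed cell (in-bounds by
-- row count and by len(grid[0])) lies beyond its own row's length (IndexError on grid[y][x]).
def Pre_gen_moves (grid : List (List Int)) (direction : String) (pos : Int × Int) : Prop :=
  direction ∈ (["N", "E", "W", "S"] : List String) ∧ grid ≠ [] ∧
  ∀ i ∈ PySem.List.pyRange 1 11 1,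
    (0 ≤ pos.1 + (pvOffset direction).1 * i ∧ pos.1 + (pvOffset direction).1 * i < (grid.length : Int) ∧
     0 ≤ pos.2 + (pvOffset direction).2 * i ∧ pos.2 + (pvOffset direction).2 * i < (((PySem.List.pyGet? grid 0).getD []).length : Int)) →
    pos.2 + (pvOffset direction).2 * i < (((PySem.List.pyGet? grid (pos.1 + (pvOffset direction).1 * i)).getD []).length : Int)

instance (grid : List (List Int)) (direction : String) (pos : Int × Int) : Decidable (Pre_gen_moves grid direction pos) := by unfold Pre_gen_moves; infer_instance

def pvWitness_gen_moves : List (List Int) × String × (Int × Int) := ([[1, 2], [3, 4]], "E", (0, 0))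

def Spec_gen_moves (grid : List (List Int)) (direction : String) (pos : Int × Int) (out : List (Int × (Int × Int) × List String)) : Prop := out = gen_moves_alt grid direction pos
instance (grid : List (List Int)) (direction : String) (pos : Int × Int) (out : List (Int × (Int × Int) × List String)) : Decidable (Spec_gen_moves grid direction pos out) := by unfold Spec_gen_moves; infer_instance

-- ===== CLAIM (what is proved, stated in full; the proofs are below) =====
def Claim_equal_gen_moves : Prop := ∀ (grid : List (List Int)) (direction : String) (pos : Int × Int), Dom_gen_moves grid direction pos → Pre_gen_moves grid direction pos → Spec_gen_moves grid direction pos (gen_moves grid direction pos)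

-- ===== LEMMAS AND PROOFS =====

-- proof-side fused loop: one pass over steps with state (moves, score, in-grid count)
def pvFused (grid : List (List Int)) (direction : String) (pos offset : Int × Int)
    (glen gzlen : Int)
    (st : List (Int × (Int × Int) × List String) × Int × Nat) (i : Int) :
    List (Int × (Int × Int) × List String) × Int × Nat :=
  let y := pos.1 + offset.1 * i
  let x := pos.2 + offset.2 * i
  if 0 ≤ y ∧ y < glen ∧ 0 ≤ x ∧ x < gzlen then
    let s := st.2.1 + pvCell grid y x
    let k := st.2.2 + 1
    ((if 4 ≤ i then st.1 ++ [(s, (y, x), List.replicate k direction)] else st.1), s, k)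
  else st

-- the in-grid hit list a step list produces (definitionally B's hits when l = pyRange 1 11 1)
def pvHits (grid : List (List Int)) (pos offset : Int × Int) (h w : Int) (l : List Int) :
    List (Int × Int × Int) :=
  (l.map (fun i => (pos.1 + offset.1 * i, pos.2 + offset.2 * i, i))).filter
    (fun t => decide (0 ≤ t.1) && decide (t.1 < h) && decide (0 ≤ t.2.1) && decide (t.2.1 < w))

-- the moves a hit list yields, with accumulated score s and count k before it
def pvEmits (grid : List (List Int)) (d : String) (hits : List (Int × Int × Int))
    (s : Int) (k : Nat) : List (Int × (Int × Int) × List String) :=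
  match hits with
  | [] => []
  | t :: rest =>
    (if (4 : Int) ≤ t.2.2 then
        [(s + pvCell grid t.1 t.2.1, (t.1, t.2.1), List.replicate (k + 1) d)] else [])
      ++ pvEmits grid d rest (s + pvCell grid t.1 t.2.1) (k + 1)

theorem pv_is_in_grid_iff (i j a b : Int) :
    is_in_grid i j a b = true ↔ (0 ≤ i ∧ i < a ∧ 0 ≤ j ∧ j < b) := by
  simp [is_in_grid, and_assoc, ge_iff_le]

theorem pv_filter_iff (y x a b : Int) :
    (decide (0 ≤ y) && decide (y < a) && decide (0 ≤ x) && decide (x < b)) = true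
      ↔ (0 ≤ y ∧ y < a ∧ 0 ≤ x ∧ x < b) := by
  simp [and_assoc]

theorem pv_phase1 (grid : List (List Int)) (d : String) (pos off : Int × Int) (a b : Int)
    (l : List Int) (hl : ∀ i ∈ l, ¬ (4 : Int) ≤ i) :
    ∀ (ms : List (Int × (Int × Int) × List String)) (s : Int) (k : Nat),
      ∃ k' : Nat,
        List.foldl (pvFused grid d pos off a b) (ms, s, k) l
          = (ms, (List.foldl (pvStepA1 grid d pos off a b) (s, List.replicate k d) l).1, k')
        ∧ (List.foldl (pvStepA1 grid d pos off a b) (s, List.replicate k d) l).2 = List.replicate k' d := by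
  induction l with
  | nil => intro ms s k; exact ⟨k, rfl, rfl⟩
  | cons i l ih =>
    intro ms s k
    have hi : ¬ (4 : Int) ≤ i := hl i (List.mem_cons_self ..)
    have hl' : ∀ j ∈ l, ¬ (4 : Int) ≤ j := fun j hj => hl j (List.mem_cons_of_mem _ hj)
    by_cases h : 0 ≤ pos.1 + off.1 * i ∧ pos.1 + off.1 * i < a ∧ 0 ≤ pos.2 + off.2 * i ∧ pos.2 + off.2 * i < b
    · simp only [List.foldl_cons, pvStepA1, pvFused, if_pos h, if_neg hi,
        if_pos ((pv_is_in_grid_iff _ _ _ _).mpr h), ← List.replicate_succ']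
      exact ih hl' ms (s + pvCell grid (pos.1 + off.1 * i) (pos.2 + off.2 * i)) (k + 1)
    · simp only [List.foldl_cons, pvStepA1, pvFused, if_neg h,
        if_neg (fun hc => h ((pv_is_in_grid_iff _ _ _ _).mp hc))]
      exact ih hl' ms s k

theorem pv_phase2 (grid : List (List Int)) (d : String) (pos off : Int × Int) (a b : Int)
    (l : List Int) (hl : ∀ i ∈ l, (4 : Int) ≤ i) :
    ∀ (ms : List (Int × (Int × Int) × List String)) (s : Int) (k : Nat),
      (List.foldl (pvFused grid d pos off a b) (ms, s, k) l).1
        = (List.foldl (pvStepA2 grid d pos off a b) (ms, s, List.replicate k d) l).1 := by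
  induction l with
  | nil => intro ms s k; rfl
  | cons i l ih =>
    intro ms s k
    have hi : (4 : Int) ≤ i := hl i (List.mem_cons_self ..)
    have hl' : ∀ j ∈ l, (4 : Int) ≤ j := fun j hj => hl j (List.mem_cons_of_mem _ hj)
    by_cases h : 0 ≤ pos.1 + off.1 * i ∧ pos.1 + off.1 * i < a ∧ 0 ≤ pos.2 + off.2 * i ∧ pos.2 + off.2 * i < b
    · simp only [List.foldl_cons, pvStepA2, pvFused, if_pos h, if_pos hi,
        if_pos ((pv_is_in_grid_iff _ _ _ _).mpr h), ← List.replicate_succ']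
      exact ih hl' _ _ (k + 1)
    · simp only [List.foldl_cons, pvStepA2, pvFused, if_neg h,
        if_neg (fun hc => h ((pv_is_in_grid_iff _ _ _ _).mp hc))]
      exact ih hl' ms s k

-- A's two folds equal the fused single fold
theorem pv_core (grid : List (List Int)) (d : String) (pos off : Int × Int) (a b : Int) :
    ((PySem.List.pyRange 4 11 1).foldl (pvStepA2 grid d pos off a b)
      ([], (PySem.List.pyRange 1 4 1).foldl (pvStepA1 grid d pos off a b) (0, []))).1
    = ((PySem.List.pyRange 1 11 1).foldl (pvFused grid d pos off a b) ([], 0, 0)).1 := by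
  have hsplit : PySem.List.pyRange 1 11 1 = PySem.List.pyRange 1 4 1 ++ PySem.List.pyRange 4 11 1 := by decide
  rw [hsplit, List.foldl_append]
  obtain ⟨k', hB, hm⟩ := pv_phase1 grid d pos off a b (PySem.List.pyRange 1 4 1) (by decide) [] 0 0
  simp only [List.replicate_zero] at hB hm
  rw [hB, pv_phase2 grid d pos off a b (PySem.List.pyRange 4 11 1) (by decide), ← hm]

-- the fused fold's move list is pvEmits over the hit list
theorem pv_fused_emits (grid : List (List Int)) (d : String) (pos off : Int × Int) (a b : Int)
    (l : List Int) :
    ∀ (ms : List (Int × (Int × Int) × List String)) (s : Int) (k : Nat),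
      (List.foldl (pvFused grid d pos off a b) (ms, s, k) l).1
        = ms ++ pvEmits grid d (pvHits grid pos off a b l) s k := by
  induction l with
  | nil => intro ms s k; simp [pvHits, pvEmits]
  | cons i l ih =>
    intro ms s k
    by_cases h : 0 ≤ pos.1 + off.1 * i ∧ pos.1 + off.1 * i < a ∧ 0 ≤ pos.2 + off.2 * i ∧ pos.2 + off.2 * i < b
    · have hf : (decide (0 ≤ pos.1 + off.1 * i) && decide (pos.1 + off.1 * i < a) &&
          decide (0 ≤ pos.2 + off.2 * i) && decide (pos.2 + off.2 * i < b)) = true :=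
        (pv_filter_iff _ _ _ _).mpr h
      have hhits : pvHits grid pos off a b (i :: l)
          = (pos.1 + off.1 * i, pos.2 + off.2 * i, i) :: pvHits grid pos off a b l := by
        simp only [pvHits, List.map_cons]
        exact List.filter_cons_of_pos hf
      rw [hhits]
      by_cases hi : (4 : Int) ≤ i
      · simp only [List.foldl_cons, pvFused, if_pos h, if_pos hi]
        rw [ih]
        simp [pvEmits, if_pos hi, List.append_assoc]
      · simp only [List.foldl_cons, pvFused, if_pos h, if_neg hi]
        rw [ih]
        simp [pvEmits, if_neg hi]
    · have hf : ¬ ((decide (0 ≤ pos.1 + off.1 * i) && decide (pos.1 + off.1 * i < a) &&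
          decide (0 ≤ pos.2 + off.2 * i) && decide (pos.2 + off.2 * i < b)) = true) :=
        fun hc => h ((pv_filter_iff _ _ _ _).mp hc)
      have hhits : pvHits grid pos off a b (i :: l) = pvHits grid pos off a b l := by
        simp only [pvHits, List.map_cons]
        exact List.filter_cons_of_neg hf
      rw [hhits]
      simp only [List.foldl_cons, pvFused, if_neg h]
      exact ih ms s k

-- B's index comprehension equals pvEmits
theorem pv_range_emits (grid : List (List Int)) (d : String) :
    ∀ (hits : List (Int × Int × Int)) (s : Int) (k : Nat),
      ((List.range hits.length).filter
          (fun j => decide ((4 : Int) ≤ (hits.getD j (0, 0, 0)).2.2))).map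
        (fun j => (s + pvHitCellSum grid hits j,
                   ((hits.getD j (0, 0, 0)).1, (hits.getD j (0, 0, 0)).2.1),
                   List.replicate (k + j + 1) d))
      = pvEmits grid d hits s k := by
  intro hits
  induction hits with
  | nil => intro s k; simp [pvEmits]
  | cons t rest ih =>
    intro s k
    have hr : List.range (t :: rest).length = 0 :: (List.range rest.length).map Nat.succ := by
      simp [List.range_succ_eq_map]
    have hfun :
        ((fun j => (s + pvHitCellSum grid (t :: rest) j,
                 (((t :: rest).getD j (0, 0, 0)).1, ((t :: rest).getD j (0, 0, 0)).2.1),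
                 List.replicate (k + j + 1) d)) ∘ Nat.succ)
        = (fun j => ((s + pvCell grid t.1 t.2.1) + pvHitCellSum grid rest j,
                 ((rest.getD j (0, 0, 0)).1, (rest.getD j (0, 0, 0)).2.1),
                 List.replicate ((k + 1) + j + 1) d)) := by
      funext j
      simp only [Function.comp_apply, List.getD_cons_succ, pvHitCellSum, Nat.succ_eq_add_one,
        List.take_succ_cons, List.map_cons, List.sum_cons, Prod.mk.injEq]
      refine ⟨by ring, trivial, ?_⟩
      congr 1
      omega
    have hpred : ((fun j => decide ((4 : Int) ≤ ((t :: rest).getD j (0, 0, 0)).2.2)) ∘ Nat.succ)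
        = (fun j => decide ((4 : Int) ≤ (rest.getD j (0, 0, 0)).2.2)) := by
      funext j; simp
    rw [hr, List.filter_cons]
    by_cases ht : (4 : Int) ≤ t.2.2
    · rw [if_pos (by simp [ht]), List.map_cons]
      simp only [List.filter_map, List.map_map]
      rw [hpred, hfun, ih (s + pvCell grid t.1 t.2.1) (k + 1)]
      simp [pvEmits, if_pos ht, pvHitCellSum]
    · rw [if_neg (by simp [ht])]
      simp only [List.filter_map, List.map_map]
      rw [hpred, hfun, ih (s + pvCell grid t.1 t.2.1) (k + 1)]
      simp [pvEmits, if_neg ht]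

-- end-to-end, for a fixed offset
theorem pv_chain (grid : List (List Int)) (d : String) (pos off : Int × Int) (a b : Int) :
    ((PySem.List.pyRange 4 11 1).foldl (pvStepA2 grid d pos off a b)
      ([], (PySem.List.pyRange 1 4 1).foldl (pvStepA1 grid d pos off a b) (0, []))).1
    = ((List.range (pvHits grid pos off a b (PySem.List.pyRange 1 11 1)).length).filter
          (fun k => decide ((4 : Int) ≤ ((pvHits grid pos off a b (PySem.List.pyRange 1 11 1)).getD k (0, 0, 0)).2.2))).map
        (fun k => (pvHitCellSum grid (pvHits grid pos off a b (PySem.List.pyRange 1 11 1)) k,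
                   (((pvHits grid pos off a b (PySem.List.pyRange 1 11 1)).getD k (0, 0, 0)).1,
                    ((pvHits grid pos off a b (PySem.List.pyRange 1 11 1)).getD k (0, 0, 0)).2.1),
                   List.replicate (k + 1) d)) := by
  rw [pv_core, pv_fused_emits grid d pos off a b (PySem.List.pyRange 1 11 1) [] 0 0,
    List.nil_append]
  have := pv_range_emits grid d (pvHits grid pos off a b (PySem.List.pyRange 1 11 1)) 0 0
  simp only [zero_add] at this
  exact this.symm

-- ===== VERDICT (by name: the statement is the Claim_ definition above) =====
theorem gen_moves_spec : Claim_equal_gen_moves := by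
  intro grid direction pos _ hpre
  unfold Pre_gen_moves at hpre
  obtain ⟨hd, -, -⟩ := hpre
  unfold Spec_gen_moves gen_moves gen_moves_alt
  simp only [List.mem_cons, List.not_mem_nil, or_false] at hd
  rcases hd with h | h | h | h <;> subst h <;>
    exact pv_chain grid _ pos _ grid.length (((PySem.List.pyGet? grid 0).getD []).length : Int)
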